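-- pv_equiv track=rewrite | github.com/shimech/-AtCoder | 20190420_TPBC2019/C-Stones.py | num_change
-- ===== SOURCE A (Python) =====
-- def num_change(S, border, N):
--     count = 0
--     for i in range(N):
--         if i < border:
--             if S[i] == '#':
--                 count += 1
--         else:
--             if S[i] == '.':
--                 count += 1
--     return count
-- ===== SOURCE B (Python) =====
-- def num_change(S, border, N):
--     # two independent region counts instead of one positional loop
--     n = max(N, 0)
--     b = min(max(border, 0), n)
--     return S[:b].count('#') + S[b:n].count('.')
-- ===== Notes on version B (the rewrite author's own statement) =====
-- stated objective: simpler
-- what changed: Replaces A's positional loop with its per-index branch by two independent region counts: '#' in the clamped left slice S[:b] plus '.' in the clamped right slice S[b:n].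
import Mathlib
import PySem

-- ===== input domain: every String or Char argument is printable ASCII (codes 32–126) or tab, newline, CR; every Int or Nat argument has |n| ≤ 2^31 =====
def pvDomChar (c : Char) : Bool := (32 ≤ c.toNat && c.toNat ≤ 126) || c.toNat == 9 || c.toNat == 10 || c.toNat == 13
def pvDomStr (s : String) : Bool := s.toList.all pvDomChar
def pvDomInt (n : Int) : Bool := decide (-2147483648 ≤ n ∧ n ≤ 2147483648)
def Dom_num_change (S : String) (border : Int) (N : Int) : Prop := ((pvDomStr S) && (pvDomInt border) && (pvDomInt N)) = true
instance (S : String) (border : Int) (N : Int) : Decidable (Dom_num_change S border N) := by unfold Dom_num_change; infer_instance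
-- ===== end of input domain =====

-- B replaces A's positional loop by two independent region counts (left '#' count + right '.' count over clamped slices); objective: simpler.

-- ===== PORT A =====
def num_change (S : String) (border : Int) (N : Int) : Int :=
  (PySem.List.pyRange 0 N 1).foldl (fun count i =>
    if i < border then
      if PySem.Str.pyGet? S i = some '#' then count + 1 else count
    else
      if PySem.Str.pyGet? S i = some '.' then count + 1 else count) 0

-- ===== PORT B =====
def num_change_alt (S : String) (border : Int) (N : Int) : Int :=
  let n := max N 0
  let b := min (max border 0) n
  (PySem.Str.count (PySem.Str.slice S none (some b)) "#" : Int)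
    + (PySem.Str.count (PySem.Str.slice S (some b) (some n)) "." : Int)

-- ===== PRECONDITION & SPEC =====
-- Pre_ excludes exactly the inputs where A raises IndexError: range(N) reaching past the end of S.
def Pre_num_change (S : String) (border : Int) (N : Int) : Prop := N ≤ PySem.Str.len S
instance (S : String) (border : Int) (N : Int) : Decidable (Pre_num_change S border N) := by unfold Pre_num_change; infer_instance
def pvWitness_num_change : String × Int × Int := ("#.#.", 2, 4)

def Spec_num_change (S : String) (border : Int) (N : Int) (out : Int) : Prop := out = num_change_alt S border N
instance (S : String) (border : Int) (N : Int) (out : Int) : Decidable (Spec_num_change S border N out) := by unfold Spec_num_change; infer_instance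

-- ===== CLAIM (what is proved, stated in full; the proofs are below) =====
def Claim_equal_num_change : Prop := ∀ (S : String) (border : Int) (N : Int), Dom_num_change S border N → Pre_num_change S border N → Spec_num_change S border N (num_change S border N)

-- ===== LEMMAS AND PROOFS =====

-- Python's str.count with a one-character needle is List.count.
theorem pv_count_go_single (c : Char) : ∀ (fuel : Nat) (l : List Char) (acc : Nat),
    l.length ≤ fuel → PySem.Chars.count.go [c] fuel l acc = acc + l.count c := by
  intro fuel
  induction fuel with
  | zero =>
    intro l acc h
    have : l = [] := by cases l with | nil => rfl | cons a t => simp at h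
    subst this; simp [PySem.Chars.count.go]
  | succ fuel ih =>
    intro l acc h
    cases l with
    | nil => simp [PySem.Chars.count.go]
    | cons a t =>
      simp only [List.length_cons, Nat.add_le_add_iff_right] at h
      by_cases hc : a = c
      · subst hc
        have hpre : List.isPrefixOf [a] (a :: t) = true := by simp [List.isPrefixOf]
        simp only [PySem.Chars.count.go, hpre, if_pos, List.length_cons, List.length_nil,
          Nat.zero_add, List.drop_succ_cons, List.drop_zero]
        rw [ih t (acc + 1) h]
        simp
        omega
      · have hpre : List.isPrefixOf [c] (a :: t) = false := by
          simp [List.isPrefixOf]; exact fun hh => (hc hh.symm).elim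
        simp only [PySem.Chars.count.go, hpre, Bool.false_eq_true, if_false]
        rw [ih t acc h]
        simp [hc]

theorem pv_count_single (cs : List Char) (c : Char) :
    PySem.Chars.count cs [c] = cs.count c := by
  simpa [PySem.Chars.count] using pv_count_go_single c cs.length cs 0 le_rfl

-- range(N) for positive N is the naturals 0 .. N-1
theorem pv_range_eq (N : Int) (h : 0 < N) :
    PySem.List.pyRange 0 N 1 = List.map (fun k : Nat => (k : Int)) (List.range N.toNat) := by
  rw [PySem.List.pyRange_of_pos _ _ (by norm_num : (0:Int) < 1), if_pos (by omega : (0:Int) < N)]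
  simp [List.map_eq_flatMap]

-- the loop body of A, after the indices are seen to be the naturals 0 .. m-1 and the
-- border comparison is rephrased through the clamped border bn
def pvBody (cs : List Char) (bn : Nat) : Int → Nat → Int := fun count k =>
  if k < bn then
    if cs[k]? = some '#' then count + 1 else count
  else
    if cs[k]? = some '.' then count + 1 else count

theorem pv_fold_lt (cs : List Char) (bn : Nat) : ∀ (m : Nat) (acc : Int), m ≤ bn → m ≤ cs.length →
    (List.range m).foldl (pvBody cs bn) acc = acc + ((cs.take m).count '#' : Int) := by
  intro m
  induction m with
  | zero => intro acc _ _; simp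
  | succ m ih =>
    intro acc h1 h2
    rw [List.range_succ, List.foldl_append, ih acc (by omega) (by omega)]
    have hm : m < cs.length := by omega
    have hget : cs[m]? = some cs[m] := List.getElem?_eq_getElem hm
    simp only [List.foldl_cons, List.foldl_nil, pvBody, if_pos (show m < bn by omega), hget]
    rw [List.take_add_one, List.count_append, hget]
    by_cases hc : cs[m] = '#' <;> simp [hc, List.count_singleton] <;> push_cast <;> ring

-- loop invariant: A's fold over 0 .. m-1 is the '#'-count left of bn plus the '.'-count in [bn, m)
theorem pv_fold_main (cs : List Char) (bn : Nat) : ∀ (m : Nat) (acc : Int), bn ≤ m → m ≤ cs.length →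
    (List.range m).foldl (pvBody cs bn) acc
      = acc + ((cs.take bn).count '#' : Int) + (((cs.drop bn).take (m - bn)).count '.' : Int) := by
  intro m
  induction m with
  | zero =>
    intro acc h1 _
    have : bn = 0 := by omega
    subst this; simp
  | succ m ih =>
    intro acc h1 h2
    by_cases hb : bn = m + 1
    · subst hb
      rw [pv_fold_lt cs (m+1) (m+1) acc le_rfl h2]
      simp
    · have h1' : bn ≤ m := by omega
      rw [List.range_succ, List.foldl_append, ih acc h1' (by omega)]
      have hm : m < cs.length := by omega
      have hget : cs[m]? = some cs[m] := List.getElem?_eq_getElem hm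
      simp only [List.foldl_cons, List.foldl_nil, pvBody, if_neg (show ¬ m < bn by omega), hget]
      have hstep : (cs.drop bn).take (m + 1 - bn) = (cs.drop bn).take (m - bn) ++ [cs[m]] := by
        rw [show m + 1 - bn = (m - bn) + 1 by omega, List.take_add_one]
        have : (cs.drop bn)[m - bn]? = some cs[m] := by
          rw [List.getElem?_drop, show bn + (m - bn) = m by omega]; exact hget
        rw [this]; rfl
      rw [hstep, List.count_append]
      by_cases hc : cs[m] = '.' <;> simp [hc, List.count_singleton] <;> push_cast <;> ring

-- ===== VERDICT (by name: the statement is the Claim_ definition above) =====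
theorem num_change_spec : Claim_equal_num_change := by
  intro S border N _ hpre
  unfold Spec_num_change num_change num_change_alt
  have hlen : N ≤ (S.toList.length : Int) := by
    have h := hpre
    unfold Pre_num_change at h
    rwa [PySem.Str.len_eq] at h
  by_cases hN : 0 < N
  · -- loop really runs: N steps over indices 0 .. N-1
    set cs := S.toList with hcs
    set m := N.toNat with hm
    set bn := (min (max border 0) N).toNat with hbn
    have hmlen : m ≤ cs.length := by omega
    have hbnm : bn ≤ m := by omega
    rw [pv_range_eq N hN, List.foldl_map]
    rw [PySem.List.foldl_congr_mem _ _ (pvBody cs bn) 0 ?_]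
    · -- B's side: slices become take/drop, str.count becomes List.count
      have hmax : max N 0 = N := by omega
      have hb0 : (0:Int) ≤ min (max border 0) N := by omega
      have hN0 : (0:Int) ≤ N := by omega
      simp only [hmax]
      rw [pv_fold_main cs bn m 0 hbnm hmlen]
      simp only [PySem.Str.count_eq, PySem.Str.toList_slice, PySem.Chars.slice]
      rw [PySem.List.slice_to _ hb0, PySem.List.slice_toNat _ hb0 hN0]
      rw [show ("#" : String).toList = ['#'] from rfl, show ("." : String).toList = ['.'] from rfl]
      rw [pv_count_single, pv_count_single]
      simp only [← hcs, ← hbn, ← hm]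
      ring
    · -- the two loop bodies agree on every index 0 ≤ k < m
      intro acc x hx
      simp only [List.mem_range] at hx
      have hget : PySem.Str.pyGet? S ((x : Int)) = cs[x]? := by
        simp [PySem.Str.pyGet?_natCast, hcs]
      have hcond : ((x : Int) < border) ↔ (x < bn) := by omega
      simp only [pvBody, hget]
      by_cases hc : (x : Int) < border
      · rw [if_pos hc, if_pos (hcond.mp hc)]
      · rw [if_neg hc, if_neg (fun hh => hc (hcond.mpr hh))]
  · -- N ≤ 0: the loop is empty and both slices are empty
    have hrange : PySem.List.pyRange 0 N 1 = [] := by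
      rw [PySem.List.pyRange_of_pos _ _ (by norm_num : (0:Int) < 1),
        if_neg (by omega : ¬ (0:Int) < N)]
      simp
    have hmax : max N 0 = 0 := by omega
    have hmin : min (max border 0) 0 = 0 := by omega
    rw [hrange]
    simp only [List.foldl_nil, hmax, hmin]
    simp only [PySem.Str.count_eq, PySem.Str.toList_slice, PySem.Chars.slice]
    rw [PySem.List.slice_to _ le_rfl, PySem.List.slice_toNat _ le_rfl le_rfl]
    simp [pv_count_single]
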